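-- pv_equiv track=rewrite | github.com/ricpelo/pro-clases | mastermind.py | digitos_descolocados
-- ===== SOURCE A (Python) =====
-- def digitos_descolocados(objetivo, intento):
--     def digito_correcto(posicion):
--         return objetivo[posicion] == intento[posicion]
--     descolocados = 0
--     for i in range(len(intento)):
--         if digito_correcto(i):
--             continue
--         for j in range(len(objetivo)):
--             if i != j and intento[i] == objetivo[j]:
--                 descolocados += 1
--                 break
--     return descolocados
-- ===== SOURCE B (Python) =====
-- def digitos_descolocados(objetivo, intento):
--     presentes = sum(c in objetivo for c in intento)
--     correctos = sum(objetivo[i] == intento[i] for i in range(len(intento)))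
--     return presentes - correctos
-- ===== Notes on version B (the rewrite author's own statement) =====
-- stated objective: simpler
-- what changed: Replaces the per-position inner scan of objetivo with a break by two independent counts (characters of intento present in objetivo via the built-in substring test, and exact positional matches by indexing) whose difference is the number of misplaced digits.
import Mathlib
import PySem

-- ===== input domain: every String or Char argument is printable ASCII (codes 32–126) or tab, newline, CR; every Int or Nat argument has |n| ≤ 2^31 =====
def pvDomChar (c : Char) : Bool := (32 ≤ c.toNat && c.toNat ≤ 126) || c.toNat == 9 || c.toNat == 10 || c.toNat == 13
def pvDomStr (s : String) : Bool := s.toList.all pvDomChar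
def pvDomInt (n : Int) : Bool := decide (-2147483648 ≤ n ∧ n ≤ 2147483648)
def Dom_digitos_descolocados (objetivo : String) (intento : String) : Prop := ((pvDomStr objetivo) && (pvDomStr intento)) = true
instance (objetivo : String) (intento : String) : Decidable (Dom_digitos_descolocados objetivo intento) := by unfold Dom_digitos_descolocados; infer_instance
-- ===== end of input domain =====

-- B replaces A's per-position scan of objetivo with a break by two independent counts
-- (presence count minus exact-match count); objective: simpler.

-- ===== PORT A =====
-- literal transliteration: for i in range(len(intento)), skip exact matches, inner
-- for-j loop with break ported as List.any; objetivo[i]/intento[i] via pyGetD (in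
-- range for every input admitted by Pre_).
def digitos_descolocados (objetivo : String) (intento : String) : Int :=
  let o := objetivo.toList
  let t := intento.toList
  (PySem.List.pyRange 0 (t.length : Int) 1).foldl
    (fun descolocados i =>
      if PySem.List.pyGetD o i ' ' = PySem.List.pyGetD t i ' ' then descolocados
      else if (PySem.List.pyRange 0 (o.length : Int) 1).any
          (fun j => decide (i ≠ j) && decide (PySem.List.pyGetD t i ' ' = PySem.List.pyGetD o j ' ')) then
        descolocados + 1
      else descolocados) 0

-- ===== PORT B =====
-- presentes: sum of membership tests over intento; correctos: sum over
-- range(len(intento)) of objetivo[i] == intento[i] (pyGetD, in range under Pre_).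
def digitos_descolocados_alt (objetivo : String) (intento : String) : Int :=
  let o := objetivo.toList
  let t := intento.toList
  let presentes : Int := (t.countP (fun c => decide (c ∈ o)) : Nat)
  let correctos : Int := (PySem.List.pyRange 0 (t.length : Int) 1).foldl
    (fun acc i => acc + (if PySem.List.pyGetD o i ' ' = PySem.List.pyGetD t i ' ' then 1 else 0)) 0
  presentes - correctos

-- ===== PRECONDITION & SPEC =====
-- Both programs index objetivo[i] for every i < len(intento), so both raise
-- IndexError exactly when intento is longer than objetivo; Pre_ excludes those
-- inputs (A returns on all others).
def Pre_digitos_descolocados (objetivo : String) (intento : String) : Prop :=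
  intento.toList.length ≤ objetivo.toList.length

instance (objetivo : String) (intento : String) : Decidable (Pre_digitos_descolocados objetivo intento) := by
  unfold Pre_digitos_descolocados; infer_instance

def pvWitness_digitos_descolocados : String × String := ("1234", "1325")

def Spec_digitos_descolocados (objetivo : String) (intento : String) (out : Int) : Prop := out = digitos_descolocados_alt objetivo intento
instance (objetivo : String) (intento : String) (out : Int) : Decidable (Spec_digitos_descolocados objetivo intento out) := by unfold Spec_digitos_descolocados; infer_instance

-- ===== CLAIM (what is proved, stated in full; the proofs are below) =====
def Claim_equal_digitos_descolocados : Prop := ∀ (objetivo : String) (intento : String), Dom_digitos_descolocados objetivo intento → Pre_digitos_descolocados objetivo intento → Spec_digitos_descolocados objetivo intento (digitos_descolocados objetivo intento)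

-- ===== LEMMAS AND PROOFS =====

theorem pv_sum_map_sub {α : Type} (l : List α) (a b : α → Int) :
    (l.map (fun x => a x - b x)).sum = (l.map a).sum - (l.map b).sum := by
  induction l with
  | nil => simp
  | cons x xs ih => simp [List.map, ih]; ring

theorem pv_main (ol tl : List Char) (h : tl.length ≤ ol.length) :
    (PySem.List.pyRange 0 (tl.length : Int) 1).foldl
      (fun descolocados i =>
        if PySem.List.pyGetD ol i ' ' = PySem.List.pyGetD tl i ' ' then descolocados
        else if (PySem.List.pyRange 0 (ol.length : Int) 1).any
            (fun j => decide (i ≠ j) && decide (PySem.List.pyGetD tl i ' ' = PySem.List.pyGetD ol j ' ')) then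
          descolocados + 1
        else descolocados) 0
    = ((tl.countP (fun c => decide (c ∈ ol)) : Nat) : Int)
      - (PySem.List.pyRange 0 (tl.length : Int) 1).foldl
          (fun acc i => acc + (if PySem.List.pyGetD ol i ' ' = PySem.List.pyGetD tl i ' ' then 1 else 0)) 0 := by
  -- turn A's loop into a sum of per-index contributions
  have hstep : (PySem.List.pyRange 0 (tl.length : Int) 1).foldl
      (fun descolocados i =>
        if PySem.List.pyGetD ol i ' ' = PySem.List.pyGetD tl i ' ' then descolocados
        else if (PySem.List.pyRange 0 (ol.length : Int) 1).any
            (fun j => decide (i ≠ j) && decide (PySem.List.pyGetD tl i ' ' = PySem.List.pyGetD ol j ' ')) then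
          descolocados + 1
        else descolocados) (0 : Int)
      = (PySem.List.pyRange 0 (tl.length : Int) 1).foldl
      (fun descolocados i => descolocados +
        (if PySem.List.pyGetD ol i ' ' = PySem.List.pyGetD tl i ' ' then 0
         else if (PySem.List.pyRange 0 (ol.length : Int) 1).any
            (fun j => decide (i ≠ j) && decide (PySem.List.pyGetD tl i ' ' = PySem.List.pyGetD ol j ' ')) then 1
         else 0)) (0 : Int) := by
    apply PySem.List.foldl_congr_mem
    intro acc i _
    split_ifs <;> omega
  refine hstep.trans ?_
  rw [PySem.List.foldl_add, PySem.List.foldl_add]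
  -- pointwise: contribution at i = [t[i] ∈ o] - [o[i] = t[i]]
  have hpt : ((PySem.List.pyRange 0 (tl.length : Int) 1).map
      (fun i =>
        (if PySem.List.pyGetD ol i ' ' = PySem.List.pyGetD tl i ' ' then (0 : Int)
         else if (PySem.List.pyRange 0 (ol.length : Int) 1).any
            (fun j => decide (i ≠ j) && decide (PySem.List.pyGetD tl i ' ' = PySem.List.pyGetD ol j ' ')) then 1
         else 0)))
      = ((PySem.List.pyRange 0 (tl.length : Int) 1).map
      (fun i =>
        (if (PySem.List.pyGetD tl i ' ') ∈ ol then (1 : Int) else 0)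
        - (if PySem.List.pyGetD ol i ' ' = PySem.List.pyGetD tl i ' ' then (1 : Int) else 0))) := by
    apply List.map_congr_left
    intro i hi
    rw [PySem.List.mem_pyRange_one] at hi
    obtain ⟨hi0, hin⟩ := hi
    have hit : i.toNat < tl.length := by omega
    have hio : i.toNat < ol.length := by omega
    have ht : PySem.List.pyGetD tl i ' ' = tl[i.toNat] := by
      rw [PySem.List.pyGetD_of_nonneg tl ' ' hi0, List.getD_eq_getElem?_getD]
      simp [hit]
    have ho : PySem.List.pyGetD ol i ' ' = ol[i.toNat] := by
      rw [PySem.List.pyGetD_of_nonneg ol ' ' hi0, List.getD_eq_getElem?_getD]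
      simp [hio]
    rw [ht, ho]
    by_cases hc : ol[i.toNat] = tl[i.toNat]
    · have hmem : tl[i.toNat] ∈ ol := hc ▸ List.getElem_mem hio
      simp [hc, hmem]
    · simp only [if_neg hc]
      have hany : (PySem.List.pyRange 0 (ol.length : Int) 1).any
          (fun j => decide (i ≠ j) && decide (tl[i.toNat] = PySem.List.pyGetD ol j ' '))
          = decide (tl[i.toNat] ∈ ol) := by
        rcases Bool.eq_false_or_eq_true (decide (tl[i.toNat] ∈ ol)) with hm | hm
        · rw [hm]
          simp only [List.any_eq_true]
          have hmem : tl[i.toNat] ∈ ol := by simpa using hm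
          obtain ⟨k, hk, hke⟩ := List.getElem_of_mem hmem
          refine ⟨(k : Int), ?_, ?_⟩
          · rw [PySem.List.mem_pyRange_one]; omega
          · have hne : i ≠ (k : Int) := by
              intro hik
              apply hc
              rw [hke.symm]
              congr 1
              omega
            have hok : PySem.List.pyGetD ol (k : Int) ' ' = ol[k] := by
              rw [PySem.List.pyGetD_of_nonneg ol ' ' (by omega : (0:Int) ≤ (k:Int)), List.getD_eq_getElem?_getD]
              simp [hk]
            simp [hne, hok, hke]
        · rw [hm]
          simp only [List.any_eq_false]
          intro j hj
          rw [PySem.List.mem_pyRange_one] at hj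
          obtain ⟨hj0, hjn⟩ := hj
          have hjo : j.toNat < ol.length := by omega
          have hoj : PySem.List.pyGetD ol j ' ' = ol[j.toNat] := by
            rw [PySem.List.pyGetD_of_nonneg ol ' ' hj0, List.getD_eq_getElem?_getD]
            simp [hjo]
          simp only [hoj, Bool.and_eq_true, decide_eq_true_eq]
          rintro ⟨-, hEq⟩
          have : tl[i.toNat] ∈ ol := hEq ▸ List.getElem_mem hjo
          simp [this] at hm
      rw [hany]
      by_cases hm : tl[i.toNat] ∈ ol <;> simp [hm]
  rw [hpt, pv_sum_map_sub]
  -- first sum: presence count over tl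
  have h1 : ((PySem.List.pyRange 0 (tl.length : Int) 1).map
      (fun i => if (PySem.List.pyGetD tl i ' ') ∈ ol then (1 : Int) else 0)).sum
      = ((tl.countP (fun c => decide (c ∈ ol)) : Nat) : Int) := by
    calc ((PySem.List.pyRange 0 (tl.length : Int) 1).map
        (fun i => if (PySem.List.pyGetD tl i ' ') ∈ ol then (1 : Int) else 0)).sum
        = (((PySem.List.pyRange 0 (tl.length : Int) 1).map
            (fun i => PySem.List.pyGetD tl i ' ')).map
            (fun c => if c ∈ ol then (1 : Int) else 0)).sum := by
          rw [List.map_map]; rfl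
      _ = (tl.map (fun c => if c ∈ ol then (1 : Int) else 0)).sum := by
          rw [PySem.List.map_pyGetD_pyRange_zero']
      _ = _ := by
          rw [show (fun c => if c ∈ ol then (1:Int) else 0)
              = (fun c => if (decide (c ∈ ol)) = true then (1:Int) else 0) by funext c; simp]
          rw [PySem.List.sum_map_ite_one_zero]
  rw [h1]; ring

-- ===== VERDICT (by name: the statement is the Claim_ definition above) =====
theorem digitos_descolocados_spec : Claim_equal_digitos_descolocados := by
  intro objetivo intento _ hpre
  unfold Spec_digitos_descolocados digitos_descolocados digitos_descolocados_alt
  exact pv_main objetivo.toList intento.toList hpre
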